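-- pv_equiv track=rewrite | github.com/denniselorm/python_projects | Bracket Match/Bracket Match/Bracket_Match.py | bracParaMatch
-- ===== SOURCE A (Python) =====
-- def bracMatch(bracstr):
--     if bracstr == '[':
--         return ']'
--     elif bracstr == '{':
--         return '}'
--     elif bracstr == '(':
--         return ')'
--
-- def bracParaMatch(strval):
--     if len(strval) % 2 == 1:
--         return "NO"
--     else:
--         mid = int(len(strval)/2)
--         sec1 = strval[:mid]
--         sec2 = strval[mid:]
--         sec2 = sec2[::-1]
--         matchIndic = 0
--         l = 0
--         while l < len(sec2) and l < len(sec1):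
--             matchPair = bracMatch(sec1[l])
--             if sec2[l] == matchPair:
--                 pass
--             else:
--                 matchIndic = 1
--                 break
--             l += 1
--         if matchIndic:
--             return "NO"
--         else:
--             return "YES"
-- ===== SOURCE B (Python) =====
-- _PAIRS = {'[': ']', '{': '}', '(': ')'}
--
-- def bracParaMatch(strval):
--     if len(strval) % 2:
--         return "NO"
--     mid = len(strval) // 2
--     stack = []
--     for i, c in enumerate(strval):
--         if i < mid:
--             stack.append(_PAIRS.get(c))
--         elif stack.pop() != c:
--             return "NO"
--     return "YES"
-- ===== Notes on version B (the rewrite author's own statement) =====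
-- stated objective: alternative
-- what changed: B replaces A's slice/reverse/mirror-index while loop with a single forward pass using an explicit stack: the first half pushes each character's expected closer, the second half pops and compares, returning NO on the first mismatch.
import Mathlib
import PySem

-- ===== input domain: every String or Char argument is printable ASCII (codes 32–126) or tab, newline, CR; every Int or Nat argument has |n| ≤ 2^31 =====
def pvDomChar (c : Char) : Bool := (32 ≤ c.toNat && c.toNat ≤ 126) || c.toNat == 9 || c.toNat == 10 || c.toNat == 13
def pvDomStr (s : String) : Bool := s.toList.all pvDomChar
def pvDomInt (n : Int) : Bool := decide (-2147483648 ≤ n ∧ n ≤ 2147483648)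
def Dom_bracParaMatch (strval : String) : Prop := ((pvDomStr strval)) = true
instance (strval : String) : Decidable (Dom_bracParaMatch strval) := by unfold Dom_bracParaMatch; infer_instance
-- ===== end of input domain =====

-- B is an alternative algorithm: one forward pass with an explicit stack (first half pushes the
-- expected closer, second half pops and compares); return-value equivalence with A is proved.

-- ===== PORT A =====
-- Python's bracMatch takes a length-1 string and returns ']'/'}'/')' or (implicitly) None;
-- ported over single characters as Option Char (none = Python's None).
def bracMatch (c : Char) : Option Char :=
  if c = '[' then some ']'
  else if c = '{' then some '}'
  else if c = '(' then some ')'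
  else none

-- the while loop of A, returning the final matchIndic; sec1[l]/sec2[l] are in range under the
-- loop guard, so getD with a dummy default is exact there.
def aLoop (sec1 sec2 : List Char) (l : Nat) : Nat :=
  if h : l < sec2.length ∧ l < sec1.length then
    if some (sec2.getD l ' ') = bracMatch (sec1.getD l ' ') then aLoop sec1 sec2 (l + 1)
    else 1
  else 0
termination_by sec1.length - l
decreasing_by omega

def bracParaMatch (strval : String) : String :=
  let s := strval.toList
  if s.length % 2 = 1 then "NO"
  else
    -- mid = int(len/2): exact for even lengths far below 2^53
    let mid := s.length / 2
    let sec1 := PySem.List.slice s none (some (mid : Int))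
    let sec2 := PySem.List.slice s (some (mid : Int)) none
    let sec2 := (PySem.List.slice? sec2 none none (-1)).getD []   -- sec2[::-1]; step -1 never raises
    if aLoop sec1 sec2 0 ≠ 0 then "NO" else "YES"

-- ===== PORT B =====
def pvPairs : PySem.Dict Char Char := PySem.Dict.ofList [('[', ']'), ('{', '}'), ('(', ')')]

-- Source B's for-loop with its early return; the stack is held top-first (push = cons, pop = head),
-- the same values Python's append/pop() handle at the list's end.
def bLoop : List Char → Nat → Nat → List (Option Char) → Bool
  | [], _, _, _ => true
  | c :: rest, i, mid, stack =>
    if i < mid then bLoop rest (i + 1) mid (PySem.Dict.get? pvPairs c :: stack)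
    else
      match stack with
      | top :: st => if top == some c then bLoop rest (i + 1) mid st else false
      | [] => false   -- unreachable for even-length input (Python's pop would raise IndexError)

def bracParaMatch_alt (strval : String) : String :=
  let s := strval.toList
  if s.length % 2 = 1 then "NO"   -- `if len(strval) % 2:` — a nonneg length is truthy iff the remainder is 1
  else if bLoop s 0 (s.length / 2) [] then "YES" else "NO"

-- ===== PRECONDITION & SPEC =====
def Spec_bracParaMatch (strval : String) (out : String) : Prop := out = bracParaMatch_alt strval
instance (strval : String) (out : String) : Decidable (Spec_bracParaMatch strval out) := by unfold Spec_bracParaMatch; infer_instance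

-- ===== CLAIM (what is proved, stated in full; the proofs are below) =====
def Claim_equal_bracParaMatch : Prop := ∀ (strval : String), Dom_bracParaMatch strval → Spec_bracParaMatch strval (bracParaMatch strval)

-- ===== LEMMAS AND PROOFS =====

lemma bracMatch_eq_pairs (c : Char) : bracMatch c = PySem.Dict.get? pvPairs c := by
  have h : pvPairs = PySem.Dict.mk [('[', ']'), ('{', '}'), ('(', ')')] := by rfl
  rw [h, bracMatch]
  simp only [PySem.Dict.get?_mk_cons, beq_iff_eq]
  split_ifs <;> first | rfl | (subst_vars; simp_all)

lemma aLoop_zero_iff (sec1 sec2 : List Char) (l : Nat) :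
    aLoop sec1 sec2 l = 0 ↔
      ∀ j, l ≤ j → j < sec2.length → j < sec1.length →
        some (sec2.getD j ' ') = bracMatch (sec1.getD j ' ') := by
  fun_induction aLoop sec1 sec2 l with
  | case1 l h heq ih =>
      rw [ih]
      constructor
      · intro H j hl h2 h1
        rcases Nat.eq_or_lt_of_le hl with rfl | hl
        · exact heq
        · exact H j hl h2 h1
      · intro H j hl h2 h1
        exact H j (by omega) h2 h1
  | case2 l h heq =>
      simp only [Nat.one_ne_zero, false_iff]
      intro H
      exact heq (H l le_rfl h.1 h.2)
  | case3 l h =>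
      simp only [true_iff]
      intro j hl h2 h1
      omega

-- after the first `mid` characters have been pushed, bLoop continues in pop mode
lemma bLoop_push (s : List Char) (i mid : Nat) (stack : List (Option Char))
    (hi : i ≤ mid) :
    bLoop s i mid stack =
      bLoop (s.drop (mid - i)) mid mid
        (((s.take (mid - i)).map (PySem.Dict.get? pvPairs)).reverse ++ stack) ∨
    s.length + i < mid := by
  induction s generalizing i stack with
  | nil =>
      by_cases h : i = mid
      · subst h; left; simp [bLoop]
      · right; simp; omega
  | cons c rest ih =>
      by_cases h : i = mid
      · subst h; left; simp
      · have hlt : i < mid := by omega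
        have hsub : mid - i = (mid - (i + 1)) + 1 := by omega
        rcases ih (i + 1) (PySem.Dict.get? pvPairs c :: stack) (by omega) with h2 | h2
        · left
          rw [show bLoop (c :: rest) i mid stack
                = bLoop rest (i + 1) mid (PySem.Dict.get? pvPairs c :: stack) from by
              simp [bLoop, hlt], h2, hsub]
          simp
        · right; simp only [List.length_cons]; omega

-- in pop mode with an equally long stack, success means the stack is exactly rest mapped
lemma bLoop_pop (rest : List Char) (stack : List (Option Char)) (i mid : Nat)
    (hi : mid ≤ i) (hlen : stack.length = rest.length) :
    (bLoop rest i mid stack = true ↔ stack = rest.map some) := by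
  induction rest generalizing stack i with
  | nil =>
      cases stack with
      | nil => simp [bLoop]
      | cons a b => simp at hlen
  | cons c rest ih =>
      cases stack with
      | nil => simp at hlen
      | cons top st =>
          rw [show bLoop (c :: rest) i mid (top :: st)
                = (if top == some c then bLoop rest (i + 1) mid st else false) from by
              simp [bLoop, Nat.not_lt.mpr hi]]
          by_cases h : top = some c
          · subst h
            simp only [beq_self_eq_true, if_true, List.map_cons, List.cons.injEq, true_and]
            exact ih st (i + 1) (by omega) (by simpa using hlen)
          · rw [if_neg (by simpa using h)]
            simp [h]

-- the mirrored getD on the reversed second half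
lemma getD_rev_drop (s : List Char) (mid j : Nat) (hdl : (s.drop mid).length = mid)
    (hj : j < mid) :
    ((s.drop mid).reverse).getD j ' ' = (s.drop mid).getD (mid - 1 - j) ' ' := by
  rw [List.getD, List.getD, List.getElem?_reverse (by omega),
      show (s.drop mid).length - 1 - j = mid - 1 - j from by omega]

lemma key_iff (s : List Char) (mid : Nat) (hmn : mid + mid = s.length) :
    aLoop (s.take mid) ((s.drop mid).reverse) 0 = 0 ↔ bLoop s 0 mid [] = true := by
  have htk : (s.take mid).length = mid := by simp; omega
  have hdl : (s.drop mid).length = mid := by simp; omega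
  rcases bLoop_push s 0 mid [] (Nat.zero_le _) with hp | hp
  swap
  · exact absurd hp (by omega)
  rw [hp, Nat.sub_zero, List.append_nil,
      bLoop_pop _ _ mid mid le_rfl (by simp only [List.length_reverse, List.length_map]; omega),
      aLoop_zero_iff]
  constructor
  · intro H
    apply List.ext_getElem?
    intro i
    by_cases hi : i < mid
    · rw [List.getElem?_reverse (by simp only [List.length_map]; omega),
          show (List.map (PySem.Dict.get? pvPairs) (s.take mid)).length - 1 - i
              = mid - 1 - i from by rw [List.length_map, htk],
          List.getElem?_map, List.getElem?_map,
          List.getElem?_eq_getElem (by omega : mid - 1 - i < (s.take mid).length),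
          List.getElem?_eq_getElem (by omega : i < (s.drop mid).length)]
      simp only [Option.map_some]
      have key := H (mid - 1 - i) (Nat.zero_le _)
        (by simp only [List.length_reverse]; omega) (by omega)
      rw [getD_rev_drop s mid _ hdl (by omega),
          show mid - 1 - (mid - 1 - i) = i from by omega, bracMatch_eq_pairs,
          List.getD_eq_getElem _ _ (by omega), List.getD_eq_getElem _ _ (by omega)] at key
      exact congrArg some key.symm
    · rw [List.getElem?_eq_none (by simp only [List.length_reverse, List.length_map]; omega),
          List.getElem?_eq_none (by simp only [List.length_map]; omega)]
  · intro H j _ h2 h1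
    have hj : j < mid := by omega
    rw [getD_rev_drop s mid j hdl hj, bracMatch_eq_pairs,
        List.getD_eq_getElem _ _ (by omega), List.getD_eq_getElem _ _ (by omega)]
    have := congrArg (fun L => L[mid - 1 - j]?) H
    simp only at this
    rw [List.getElem?_reverse (by simp only [List.length_map]; omega),
        show (List.map (PySem.Dict.get? pvPairs) (s.take mid)).length - 1 - (mid - 1 - j)
            = j from by rw [List.length_map, htk]; omega,
        List.getElem?_map, List.getElem?_map,
        List.getElem?_eq_getElem (by omega : j < (s.take mid).length),
        List.getElem?_eq_getElem (by omega : mid - 1 - j < (s.drop mid).length)] at this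
    simp only [Option.map_some, Option.some.injEq] at this
    exact this.symm

-- ===== VERDICT (by name: the statement is the Claim_ definition above) =====
theorem bracParaMatch_spec : Claim_equal_bracParaMatch := by
  intro strval _
  unfold Spec_bracParaMatch bracParaMatch bracParaMatch_alt
  by_cases hodd : strval.toList.length % 2 = 1
  · have hodd' : strval.length % 2 = 1 := by simpa using hodd
    simp [hodd']
  · simp only [hodd, if_false]
    have hmn : strval.toList.length / 2 + strval.toList.length / 2 = strval.toList.length := by omega
    rw [PySem.List.slice_to_natCast, PySem.List.slice_from_natCast,
        PySem.List.slice?_none_none_neg_one]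
    have hkey := key_iff strval.toList (strval.toList.length / 2) hmn
    by_cases hz : aLoop (strval.toList.take (strval.toList.length / 2))
        ((strval.toList.drop (strval.toList.length / 2)).reverse) 0 = 0
    · rw [Option.getD_some, if_neg (not_not_intro hz), if_pos (hkey.mp hz)]
    · rw [Option.getD_some, if_pos hz, if_neg (fun h => hz (hkey.mpr h))]
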